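-- pv_equiv track=rewrite | github.com/VincentLandrieux/Python | nombreDeDiviseurs.py | nombreDeDiviseurs
-- ===== SOURCE A (Python) =====
-- def nombreDeDiviseurs(max):
--     n = 0
--     for i in range(1, max+1):
--         c = 0
--         for j in range(1, i):
--             if i % j == 0:
--                 c += 1
--         if c >= 7:
--             n += 1
--         c = 0
--     return n
-- ===== SOURCE B (Python) =====
-- def nombreDeDiviseurs(max):
--     if max < 1:
--         return 0
--     cnt = [0] * (max + 1)
--     for j in range(1, max + 1):
--         for k in range(2, max // j + 1):
--             cnt[j * k] += 1
--     n = 0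
--     for c in cnt[1:]:
--         if c >= 7:
--             n += 1
--     return n
-- ===== Notes on version B (the rewrite author's own statement) =====
-- stated objective: faster
-- what changed: Replaces the per-number trial-division inner scan by a divisor-count sieve: one pass over each j marks all its proper multiples in a counts array, then a single pass tallies entries whose proper-divisor count reaches the threshold.
import Mathlib
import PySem

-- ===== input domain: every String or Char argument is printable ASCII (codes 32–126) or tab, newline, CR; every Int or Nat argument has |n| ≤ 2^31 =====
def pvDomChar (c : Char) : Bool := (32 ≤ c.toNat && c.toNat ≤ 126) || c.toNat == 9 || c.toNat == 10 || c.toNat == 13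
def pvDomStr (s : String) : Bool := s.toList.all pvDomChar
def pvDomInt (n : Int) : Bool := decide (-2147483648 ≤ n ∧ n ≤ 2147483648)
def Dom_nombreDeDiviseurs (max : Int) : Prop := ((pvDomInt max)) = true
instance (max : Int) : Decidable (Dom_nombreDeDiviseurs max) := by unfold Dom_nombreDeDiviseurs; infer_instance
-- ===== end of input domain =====

-- B replaces A's per-number trial-division scan by a divisor-count sieve
-- (mark multiples of each j in one counts array, then tally); measurably faster.

-- ===== PORT A =====
def nombreDeDiviseurs (max : Int) : Int :=
  (PySem.List.pyRange 1 (max + 1) 1).foldl (fun n i =>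
    let c := (PySem.List.pyRange 1 i 1).foldl
      (fun c j => if PySem.Int.mod i j == 0 then c + 1 else c) (0 : Int)
    if c ≥ 7 then n + 1 else n) 0

-- ===== PORT B =====
-- cnt[j*k] += 1 is ported with pyGetD/pySetD; every index j*k lies in range (2 ≤ k ≤ max//j),
-- so the total forms are exact here.
def nombreDeDiviseurs_alt (max : Int) : Int :=
  if max < 1 then 0
  else
    let cnt0 : List Int := List.replicate (max + 1).toNat 0
    let cnt := (PySem.List.pyRange 1 (max + 1) 1).foldl (fun cnt j =>
      (PySem.List.pyRange 2 (PySem.Int.floordiv max j + 1) 1).foldl (fun cnt k =>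
        PySem.List.pySetD cnt (j * k) (PySem.List.pyGetD cnt (j * k) 0 + 1)) cnt) cnt0
    (PySem.List.slice cnt (some 1) none).foldl (fun n c => if c ≥ 7 then n + 1 else n) 0

-- ===== PRECONDITION & SPEC =====
def Spec_nombreDeDiviseurs (max : Int) (out : Int) : Prop := out = nombreDeDiviseurs_alt max
instance (max : Int) (out : Int) : Decidable (Spec_nombreDeDiviseurs max out) := by unfold Spec_nombreDeDiviseurs; infer_instance

-- ===== CLAIM (what is proved, stated in full; the proofs are below) =====
def Claim_equal_nombreDeDiviseurs : Prop := ∀ (max : Int), Dom_nombreDeDiviseurs max → Spec_nombreDeDiviseurs max (nombreDeDiviseurs max)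

-- ===== LEMMAS AND PROOFS =====

-- the number of proper divisors of i, as A computes it
def pvPcount (i : Int) : Int :=
  ((PySem.List.pyRange 1 i 1).filter (fun j => PySem.Int.mod i j == 0)).length

theorem pv_inner_A (i : Int) :
    (PySem.List.pyRange 1 i 1).foldl
      (fun c j => if PySem.Int.mod i j == 0 then c + 1 else c) (0 : Int) = pvPcount i := by
  rw [PySem.List.foldl_if_add_one, pvPcount, List.countP_eq_length_filter]
  simp

theorem pvGetSet (xs : List Int) (i m v : Int) (hi0 : 0 ≤ i) (hil : i < (xs.length : Int))
    (hm : 0 ≤ m) :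
    PySem.List.pyGetD (PySem.List.pySetD xs i v) m 0
      = if m = i then v else PySem.List.pyGetD xs m 0 := by
  obtain ⟨a, rfl⟩ := Int.eq_ofNat_of_zero_le hi0
  obtain ⟨b, rfl⟩ := Int.eq_ofNat_of_zero_le hm
  rw [PySem.List.pyGetD_pySetD_natCast xs a b v 0 (by exact_mod_cast hil)]
  split_ifs with h1 h2 h2
  · rfl
  · exact absurd (by exact_mod_cast h1) h2
  · exact absurd (by exact_mod_cast h2) h1
  · rfl

theorem pv_inner_len (j : Int) (K : List Int) (cnt : List Int) :
    (K.foldl (fun cnt k =>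
      PySem.List.pySetD cnt (j * k) (PySem.List.pyGetD cnt (j * k) 0 + 1)) cnt).length
    = cnt.length := by
  induction K generalizing cnt with
  | nil => rfl
  | cons k K ih => simp [List.foldl_cons, ih, PySem.List.length_pySetD]

theorem pv_outer_len (max : Int) (J : List Int) (cnt : List Int) :
    (J.foldl (fun cnt j =>
      (PySem.List.pyRange 2 (PySem.Int.floordiv max j + 1) 1).foldl (fun cnt k =>
        PySem.List.pySetD cnt (j * k) (PySem.List.pyGetD cnt (j * k) 0 + 1)) cnt) cnt).length
    = cnt.length := by
  induction J generalizing cnt with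
  | nil => rfl
  | cons j J ih => rw [List.foldl_cons, ih, pv_inner_len]

-- inner sieve loop: its effect on one cell
theorem pv_inner_B (j : Int) (hj : 0 < j) (hi : Int) :
    ∀ (n : Nat) (lo : Int) (cnt : List Int), (hi - lo).toNat = n →
    (∀ k : Int, lo ≤ k → k < hi → 0 ≤ j * k ∧ j * k < (cnt.length : Int)) →
    ∀ m : Int, 0 ≤ m →
    PySem.List.pyGetD
      ((PySem.List.pyRange lo hi 1).foldl (fun cnt k =>
        PySem.List.pySetD cnt (j * k) (PySem.List.pyGetD cnt (j * k) 0 + 1)) cnt) m 0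
    = PySem.List.pyGetD cnt m 0 +
      (if (PySem.List.pyRange lo hi 1).any (fun k => j * k == m) then 1 else 0) := by
  intro n
  induction n with
  | zero =>
    intro lo cnt hn hidx m hm
    rw [PySem.List.pyRange_one_eq_nil (by omega)]
    simp
  | succ n ih =>
    intro lo cnt hn hidx m hm
    have hlt : lo < hi := by omega
    rw [PySem.List.pyRange_one_cons hlt]
    have hlen' : (PySem.List.pySetD cnt (j * lo)
        (PySem.List.pyGetD cnt (j * lo) 0 + 1)).length = cnt.length :=
      PySem.List.length_pySetD ..
    have hidx0 := hidx lo le_rfl hlt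
    rw [List.foldl_cons,
      ih (lo + 1) _ (by omega) (fun k hk1 hk2 => by
        rw [hlen']; exact hidx k (by omega) hk2) m hm,
      pvGetSet cnt (j * lo) m _ hidx0.1 hidx0.2 hm, List.any_cons]
    by_cases hmeq : m = j * lo
    · subst hmeq
      have hrest : (PySem.List.pyRange (lo + 1) hi 1).any (fun k => j * k == j * lo) = false := by
        rw [List.any_eq_false]
        intro k hk
        rw [PySem.List.mem_pyRange_one] at hk
        have h1 : j * lo < j * k := by nlinarith [hk.1]
        simp only [beq_iff_eq]
        omega
      rw [if_pos rfl, hrest]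
      simp
    · have hlo : (j * lo == m) = false := by simp; omega
      rw [if_neg hmeq, hlo, Bool.false_or]

theorem pv_sieve (max : Int) (J : List Int) (hJ : ∀ j ∈ J, 0 < j) (cnt : List Int)
    (hlen : (cnt.length : Int) = max + 1) (m : Int) (hm : 0 ≤ m) :
    PySem.List.pyGetD
      (J.foldl (fun cnt j =>
        (PySem.List.pyRange 2 (PySem.Int.floordiv max j + 1) 1).foldl (fun cnt k =>
          PySem.List.pySetD cnt (j * k) (PySem.List.pyGetD cnt (j * k) 0 + 1)) cnt) cnt) m 0
    = PySem.List.pyGetD cnt m 0 +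
      ((J.filter (fun j => decide (j ∣ m ∧ 2 * j ≤ m ∧ m ≤ max))).length : Int) := by
  induction J generalizing cnt with
  | nil => simp
  | cons j J ih =>
    have hj : 0 < j := hJ j (List.mem_cons_self ..)
    have hdiv : PySem.Int.floordiv max j = max / j := PySem.Int.floordiv_eq_ediv_of_pos hj
    have hidx : ∀ k : Int, 2 ≤ k → k < PySem.Int.floordiv max j + 1 →
        0 ≤ j * k ∧ j * k < (cnt.length : Int) := by
      intro k hk1 hk2
      rw [hdiv] at hk2
      have hkle : k ≤ max / j := by omega
      have hkj : k * j ≤ max := (Int.le_ediv_iff_mul_le hj).mp hkle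
      exact ⟨by positivity, by rw [hlen]; nlinarith⟩
    have hlen' : ((((PySem.List.pyRange 2 (PySem.Int.floordiv max j + 1) 1).foldl (fun cnt k =>
        PySem.List.pySetD cnt (j * k) (PySem.List.pyGetD cnt (j * k) 0 + 1)) cnt)).length : Int)
        = max + 1 := by rw [pv_inner_len]; exact hlen
    rw [List.foldl_cons, List.filter_cons,
      ih (fun x hx => hJ x (List.mem_cons_of_mem _ hx)) _ hlen',
      pv_inner_B j hj (PySem.Int.floordiv max j + 1)
        ((PySem.Int.floordiv max j + 1) - 2).toNat 2 cnt rfl hidx m hm]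
    have hiff : (PySem.List.pyRange 2 (PySem.Int.floordiv max j + 1) 1).any (fun k => j * k == m)
        = decide (j ∣ m ∧ 2 * j ≤ m ∧ m ≤ max) := by
      rw [hdiv]
      apply Bool.eq_iff_iff.mpr
      rw [List.any_eq_true]
      simp only [PySem.List.mem_pyRange_one, beq_iff_eq, decide_eq_true_eq]
      constructor
      · rintro ⟨k, ⟨hk1, hk2⟩, rfl⟩
        have hkle : k ≤ max / j := by omega
        have hkj : k * j ≤ max := (Int.le_ediv_iff_mul_le hj).mp hkle
        exact ⟨Dvd.intro k rfl, by nlinarith, by nlinarith⟩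
      · rintro ⟨⟨c, rfl⟩, h2, h3⟩
        refine ⟨c, ⟨by nlinarith, ?_⟩, rfl⟩
        have hc : c * j ≤ max := by nlinarith
        have := (Int.le_ediv_iff_mul_le hj).mpr hc
        omega
    rw [hiff]
    by_cases hc : j ∣ m ∧ 2 * j ≤ m ∧ m ≤ max
    · have hd : decide (j ∣ m ∧ 2 * j ≤ m ∧ m ≤ max) = true := decide_eq_true hc
      rw [hd]
      simp
      push_cast
      ring
    · have hd : decide (j ∣ m ∧ 2 * j ≤ m ∧ m ≤ max) = false := decide_eq_false hc
      rw [hd]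
      simp

-- the sieve's per-cell condition counts exactly A's proper divisors
theorem pv_count_eq (max m : Int) (hm1 : 1 ≤ m) (hm2 : m ≤ max) :
    (((PySem.List.pyRange 1 (max + 1) 1).filter
      (fun j => decide (j ∣ m ∧ 2 * j ≤ m ∧ m ≤ max))).length : Int) = pvPcount m := by
  rw [PySem.List.pyRange_one_append 1 m (max + 1) (by omega) (by omega), List.filter_append,
    List.length_append]
  have h2 : (PySem.List.pyRange m (max + 1) 1).filter
      (fun j => decide (j ∣ m ∧ 2 * j ≤ m ∧ m ≤ max)) = [] := by
    rw [List.filter_eq_nil_iff]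
    intro j hj
    rw [PySem.List.mem_pyRange_one] at hj
    simp only [decide_eq_true_eq]
    rintro ⟨-, hd, -⟩
    omega
  have h1 : (PySem.List.pyRange 1 m 1).filter (fun j => decide (j ∣ m ∧ 2 * j ≤ m ∧ m ≤ max))
      = (PySem.List.pyRange 1 m 1).filter (fun j => PySem.Int.mod m j == 0) := by
    apply List.filter_congr
    intro j hj
    rw [PySem.List.mem_pyRange_one] at hj
    apply Bool.eq_iff_iff.mpr
    simp only [decide_eq_true_eq, beq_iff_eq, PySem.Int.mod_eq_zero_iff_dvd]
    constructor
    · rintro ⟨h, -, -⟩; exact h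
    · rintro ⟨c, rfl⟩
      have hc2 : 2 ≤ c := by nlinarith
      exact ⟨⟨c, rfl⟩, by nlinarith, hm2⟩
  rw [h2, h1, pvPcount]
  simp

-- both sides reduced to the same tally over the index range
theorem pv_A_eq (max : Int) :
    nombreDeDiviseurs max = (PySem.List.pyRange 1 (max + 1) 1).foldl
      (fun n i => if pvPcount i ≥ 7 then n + 1 else n) 0 := by
  unfold nombreDeDiviseurs
  apply PySem.List.foldl_congr_mem
  intro acc i hi
  simp only [pv_inner_A]

theorem pv_alt_eq (max : Int) (hmax : 1 ≤ max) :
    nombreDeDiviseurs_alt max = (PySem.List.pyRange 1 (max + 1) 1).foldl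
      (fun n i => if pvPcount i ≥ 7 then n + 1 else n) 0 := by
  have hnl : ¬ max < 1 := by omega
  rw [nombreDeDiviseurs_alt]
  simp only [if_neg hnl]
  have hlen0 : (((List.replicate (max + 1).toNat (0 : Int)).length : Nat) : Int) = max + 1 := by
    simp; omega
  set cnt := (PySem.List.pyRange 1 (max + 1) 1).foldl (fun cnt j =>
      (PySem.List.pyRange 2 (PySem.Int.floordiv max j + 1) 1).foldl (fun cnt k =>
        PySem.List.pySetD cnt (j * k) (PySem.List.pyGetD cnt (j * k) 0 + 1)) cnt)
      (List.replicate (max + 1).toNat (0 : Int)) with hcnt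
  have hlen : ((cnt.length : Nat) : Int) = max + 1 := by
    rw [hcnt, pv_outer_len]; exact hlen0
  have hmap : (PySem.List.pyRange 1 (max + 1) 1).map (fun m => PySem.List.pyGetD cnt m 0)
      = PySem.List.slice cnt (some 1) none := by
    rw [PySem.List.slice_from cnt (by omega : (0:Int) ≤ 1), ← hlen,
      ← PySem.List.map_pyGetD_pyRange' cnt 0 (by omega : (0:Int) ≤ 1)]
  rw [← hmap, List.foldl_map]
  apply PySem.List.foldl_congr_mem
  intro acc i hi
  rw [PySem.List.mem_pyRange_one] at hi
  have hval : PySem.List.pyGetD cnt i 0 = pvPcount i := by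
    rw [hcnt, pv_sieve max _ (fun j hj => by rw [PySem.List.mem_pyRange_one] at hj; omega)
      _ hlen0 i (by omega)]
    have h0 : PySem.List.pyGetD (List.replicate (max + 1).toNat (0 : Int)) i 0 = 0 := by
      obtain ⟨a, rfl⟩ := Int.eq_ofNat_of_zero_le (by omega : (0:Int) ≤ i)
      rw [PySem.List.pyGetD_natCast]
      rcases Nat.lt_or_ge a (max + 1).toNat with h | h
      · simp [List.getD, List.getElem?_replicate, h]
      · simp [List.getD, List.getElem?_replicate, Nat.not_lt.mpr h]
    rw [h0, zero_add, pv_count_eq max i (by omega) (by omega)]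
  rw [hval]

-- ===== VERDICT (by name: the statement is the Claim_ definition above) =====
theorem nombreDeDiviseurs_spec : Claim_equal_nombreDeDiviseurs := by
  intro max _
  unfold Spec_nombreDeDiviseurs
  by_cases hmax : max < 1
  · rw [nombreDeDiviseurs_alt, if_pos hmax]
    unfold nombreDeDiviseurs
    rw [PySem.List.pyRange_one_eq_nil (by omega)]
    rfl
  · rw [pv_A_eq, pv_alt_eq max (by omega)]
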